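-- pv_equiv track=rewrite | github.com/JasonLarson44/simple2048 | game.py | merge_row_right
-- ===== SOURCE A (Python) =====
-- def merge_row_right(row):
--     max = len(row) - 1
--     i = max
--     while i > 0:
--         j = i - 1
--         while row[j] is None and j > 0:
--             j -= 1
--         if row[i] is not None and row[i] == row[j]:
--             row[i] = row[i]*2
--             row[j] = None
--         i -= 1
--     return row
-- ===== SOURCE B (Python) =====
-- def merge_row_right(row):
--     stack = [p for p in range(len(row)) if row[p] is not None]
--     while len(stack) >= 2:
--         pi = stack.pop()
--         pj = stack[-1]
--         if row[pi] == row[pj]: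
--             row[pi] *= 2
--             row[pj] = None
--             stack.pop()
--     return row
-- ===== Notes on version B (the rewrite author's own statement) =====
-- stated objective: simpler
-- what changed: B precomputes the stack of non-None tile indices once and merges by popping pairs off it, eliminating A's inner while-loop that rescans leftward over Nones at every outer step.
import Mathlib
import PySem

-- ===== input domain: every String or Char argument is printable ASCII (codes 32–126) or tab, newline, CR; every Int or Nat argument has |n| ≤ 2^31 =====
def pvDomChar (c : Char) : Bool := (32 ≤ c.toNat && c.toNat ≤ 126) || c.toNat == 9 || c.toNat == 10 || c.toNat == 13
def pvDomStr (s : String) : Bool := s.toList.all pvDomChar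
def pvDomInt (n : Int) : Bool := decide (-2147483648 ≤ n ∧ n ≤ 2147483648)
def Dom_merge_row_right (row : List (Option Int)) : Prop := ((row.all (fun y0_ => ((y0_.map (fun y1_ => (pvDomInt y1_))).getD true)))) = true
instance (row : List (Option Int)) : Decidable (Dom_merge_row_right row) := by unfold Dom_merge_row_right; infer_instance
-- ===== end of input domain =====

-- B replaces A's outer index loop with nested leftward rescans by one precomputed
-- stack of non-None positions merged by popping (objective: simpler). Both the Python
-- A and the Python B mutate `row` in place and return it; the equivalence proved here
-- is about the returned value.

-- ===== PORT A =====
-- inner while loop: `j = i - 1; while row[j] is None and j > 0: j -= 1`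
-- (called with the start value i-1; base case 0 is the `j > 0` exit)
def mrrFindJ (row : List (Option Int)) : Nat → Nat
  | 0 => 0
  | j + 1 => if row.getD (j + 1) none = none then mrrFindJ row j else j + 1

-- outer while loop: fuel is the current value of i (counts down to 0, loop body runs while i > 0)
def mrrLoopA (row : List (Option Int)) : Nat → List (Option Int)
  | 0 => row
  | i + 1 =>
    let j := mrrFindJ row i
    match row.getD (i + 1) none with
    | none => mrrLoopA row i
    | some v =>
      if row.getD j none = some v then
        mrrLoopA ((row.set (i + 1) (some (v * 2))).set j none) i
      else
        mrrLoopA row i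

def merge_row_right (row : List (Option Int)) : List (Option Int) :=
  mrrLoopA row (row.length - 1)

-- ===== PORT B =====
-- the stack is the ascending list of non-None positions; popping from its end is
-- traversing its reverse, so the loop is a recursion over the reversed list
def mrrLoopB (row : List (Option Int)) : List Nat → List (Option Int)
  | pi :: pj :: rest =>
    if row.getD pi none = row.getD pj none then
      mrrLoopB ((row.set pi (match row.getD pi none with
                             | some v => some (v * 2)
                             | none => none)).set pj none) rest
    else
      mrrLoopB row (pj :: rest)
  | _ => row

def merge_row_right_alt (row : List (Option Int)) : List (Option Int) :=
  mrrLoopB row (((List.range row.length).filter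
      (fun p => (row.getD p none).isSome)).reverse)

-- ===== PRECONDITION & SPEC =====
def Spec_merge_row_right (row : List (Option Int)) (out : List (Option Int)) : Prop := out = merge_row_right_alt row
instance (row : List (Option Int)) (out : List (Option Int)) : Decidable (Spec_merge_row_right row out) := by unfold Spec_merge_row_right; infer_instance

-- ===== CLAIM (what is proved, stated in full; the proofs are below) =====
def Claim_equal_merge_row_right : Prop := ∀ (row : List (Option Int)), Dom_merge_row_right row → Spec_merge_row_right row (merge_row_right row)

-- ===== LEMMAS AND PROOFS =====

-- shorthand normal form for row[q] reads (row.getD q none in the ports)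
def mrrG (row : List (Option Int)) (q : Nat) : Option Int := row.getD q none

-- ascending list of non-None positions below m
def mrrPos (row : List (Option Int)) (m : Nat) : List Nat :=
  (List.range m).filter (fun p => (mrrG row p).isSome)

theorem mrrLoopA_succ (row : List (Option Int)) (i : Nat) :
    mrrLoopA row (i + 1) =
      (match mrrG row (i + 1) with
       | none => mrrLoopA row i
       | some v =>
         if mrrG row (mrrFindJ row i) = some v then
           mrrLoopA ((row.set (i + 1) (some (v * 2))).set (mrrFindJ row i) none) i
         else mrrLoopA row i) := rfl

theorem mrrLoopB_cons (row : List (Option Int)) (pi pj : Nat) (rest : List Nat) :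
    mrrLoopB row (pi :: pj :: rest) =
      (if mrrG row pi = mrrG row pj then
        mrrLoopB ((row.set pi (match mrrG row pi with
                               | some v => some (v * 2)
                               | none => none)).set pj none) rest
      else mrrLoopB row (pj :: rest)) := by
  rw [mrrLoopB]; rfl

theorem mrrLoopB_nil (row : List (Option Int)) : mrrLoopB row [] = row := by
  rw [mrrLoopB]
  intro a b c h
  simp at h

theorem mrrLoopB_one (row : List (Option Int)) (x : Nat) : mrrLoopB row [x] = row := by
  rw [mrrLoopB]
  intro a b c h
  simp at h

theorem mrrFindJ_succ (row : List (Option Int)) (j : Nat) :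
    mrrFindJ row (j + 1) = if mrrG row (j + 1) = none then mrrFindJ row j else j + 1 := rfl

theorem mrrFindJ_le (row : List (Option Int)) (m : Nat) : mrrFindJ row m ≤ m := by
  induction m with
  | zero => simp [mrrFindJ]
  | succ j ih =>
    rw [mrrFindJ_succ]
    split
    · omega
    · omega

theorem mrrPos_zero (row : List (Option Int)) : mrrPos row 0 = [] := rfl

theorem mrrPos_succ (row : List (Option Int)) (m : Nat) :
    mrrPos row (m + 1) =
      mrrPos row m ++ (if (mrrG row m).isSome then [m] else []) := by
  unfold mrrPos
  rw [List.range_succ, List.filter_append]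
  congr 1
  cases h : (mrrG row m).isSome <;> simp [List.filter, h]

-- characterisation of the inner scan: it lands on the last non-None position below m+1,
-- and mrrPos decomposes accordingly
theorem mrrFindJ_pos (row : List (Option Int)) (m : Nat) :
    mrrPos row (m + 1) =
      if (mrrG row (mrrFindJ row m)).isSome then
        mrrPos row (mrrFindJ row m) ++ [mrrFindJ row m]
      else [] := by
  induction m with
  | zero =>
    rw [mrrPos_succ, show mrrFindJ row 0 = 0 from rfl, mrrPos_zero]
    cases h : (mrrG row 0).isSome <;> simp
  | succ j ih =>
    rw [mrrPos_succ row (j + 1), mrrFindJ_succ]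
    cases h : mrrG row (j + 1) with
    | none => simpa using ih
    | some v => simp [h]

theorem mrrPos_lt (row : List (Option Int)) (m : Nat) : ∀ q ∈ mrrPos row m, q < m := by
  intro q hq
  exact List.mem_range.mp (List.mem_of_mem_filter hq)

-- after a merge at positions m+1 and p (p ≤ m the last non-None below m+1),
-- the non-None positions below m+1 are exactly those below p
theorem mrrPos_after_merge (row : List (Option Int)) (m p : Nat) (x : Option Int)
    (hp : p ≤ m)
    (hpos : mrrPos row (m + 1) = mrrPos row p ++ [p]) :
    mrrPos ((row.set (m + 1) x).set p none) (m + 1) = mrrPos row p := by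
  have hcong : mrrPos ((row.set (m + 1) x).set p none) (m + 1) =
      (List.range (m + 1)).filter (fun q => decide (q ≠ p) && (mrrG row q).isSome) := by
    apply List.filter_congr
    intro q hq
    have hqlt : q < m + 1 := List.mem_range.mp hq
    by_cases hqp : q = p
    · subst hqp
      simp [mrrG, List.getD_eq_getElem?_getD, List.getElem?_set]
      split <;> simp
    · have hq1 : q ≠ m + 1 := by omega
      simp only [mrrG, List.getD_eq_getElem?_getD,
        List.getElem?_set_ne (Ne.symm hqp), List.getElem?_set_ne (Ne.symm hq1)]
      simp [hqp]
  rw [hcong]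
  have hsplit : (List.range (m + 1)).filter (fun q => decide (q ≠ p) && (mrrG row q).isSome) =
      ((List.range (m + 1)).filter (fun q => (mrrG row q).isSome)).filter
        (fun q => decide (q ≠ p)) := by
    rw [List.filter_filter]
  rw [hsplit]
  show (mrrPos row (m + 1)).filter (fun q => decide (q ≠ p)) = mrrPos row p
  rw [hpos, List.filter_append]
  have h1 : (mrrPos row p).filter (fun q => decide (q ≠ p)) = mrrPos row p := by
    apply List.filter_eq_self.mpr
    intro q hq
    have := mrrPos_lt row p q hq
    simp only [decide_eq_true_eq]
    omega
  rw [h1]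
  simp

-- the main correspondence: A's loop with fuel m equals B's loop on the reversed
-- non-None positions below m+1
theorem mrrLoop_eq (m : Nat) : ∀ row : List (Option Int),
    mrrLoopA row m = mrrLoopB row (mrrPos row (m + 1)).reverse := by
  induction m with
  | zero =>
    intro row
    show row = _
    rw [mrrPos_succ, mrrPos_zero]
    cases h : (mrrG row 0).isSome <;> simp [mrrLoopB]
  | succ m ih =>
    intro row
    have hJ := mrrFindJ_pos row m
    have hJle := mrrFindJ_le row m
    set p := mrrFindJ row m with hpdef
    rw [mrrLoopA_succ, mrrPos_succ row (m + 1)]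
    cases htop : mrrG row (m + 1) with
    | none =>
      simpa using ih row
    | some v =>
      have hx : (mrrPos row (m + 1) ++
          if (some v : Option Int).isSome = true then [m + 1] else []).reverse =
          (m + 1) :: (mrrPos row (m + 1)).reverse := by simp
      rw [hx]
      show (if mrrG row (mrrFindJ row m) = some v then
              mrrLoopA ((row.set (m + 1) (some (v * 2))).set (mrrFindJ row m) none) m
            else mrrLoopA row m) = _
      cases hpv : mrrG row p with
      | none =>
        have hpos1 : mrrPos row (m + 1) = [] := by
          rw [hJ, hpv]; rfl
        rw [if_neg (by simp), ih row, hpos1]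
        simp [mrrLoopB_nil, mrrLoopB_one]
      | some w =>
        have hpos1 : mrrPos row (m + 1) = mrrPos row p ++ [p] := by
          rw [hJ, hpv]; rfl
        have hrev : (mrrPos row (m + 1)).reverse = p :: (mrrPos row p).reverse := by
          rw [hpos1]; simp
        rw [hrev, mrrLoopB_cons, htop, hpv]
        by_cases hvw : w = v
        · subst hvw
          rw [if_pos rfl, if_pos rfl, ih]
          show mrrLoopB _ _ = mrrLoopB ((row.set (m + 1) (some (w * 2))).set p none) _
          congr 1
          have := mrrPos_after_merge row m p (some (w * 2)) hJle hpos1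
          rw [this]
        · rw [if_neg (by simp [hvw]), if_neg (by simp; exact fun hh => hvw hh.symm)]
          rw [ih row, hrev]

-- ===== VERDICT (by name: the statement is the Claim_ definition above) =====
theorem merge_row_right_spec : Claim_equal_merge_row_right := by
  intro row _
  show merge_row_right row = merge_row_right_alt row
  unfold merge_row_right merge_row_right_alt
  rw [mrrLoop_eq]
  congr 2
  show mrrPos row (row.length - 1 + 1) = _
  unfold mrrPos mrrG
  cases row with
  | nil => rfl
  | cons a l => simp
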